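-- pv_equiv track=rewrite | github.com/jenny011/Tree-Based-FIM | ZigZag/utils.py | generateFIsave
-- ===== SOURCE A (Python) =====
-- from itertools import combinations
--
-- def powerset(l):
--     ret = set()
--     for i in range(len(l)+1):
--         comb = set()
--         for element in combinations(l,i):
--             temp = ",".join(sorted(element))
--             if temp:
--                 comb.add(temp)
--         ret = ret.union(comb)
--     return ret
--
-- def generateFIsave(mfis):
--     fi = set()
--     for mfi in mfis:
--         fi = fi.union(powerset(mfi))
--     res = set()
--     for item in fi:
--         res.add(",".join(sorted(item.split(","))))
--     return sorted(list(res))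
-- ===== SOURCE B (Python) =====
-- def generateFIsave(mfis):
--     def subsets(l):
--         if not l:
--             return [[]]
--         rest = subsets(l[1:])
--         return rest + [[l[0]] + s for s in rest]
--     acc = set()
--     for mfi in mfis:
--         for s in subsets(mfi):
--             t = ",".join(sorted(s))
--             if t:
--                 acc.add(",".join(sorted(t.split(","))))
--     return sorted(acc)
-- ===== Notes on version B (the rewrite author's own statement) =====
-- stated objective: simpler
-- what changed: Replaced the size-by-size itertools.combinations powerset plus intermediate fi set and separate normalisation pass with one recursive include/exclude subset enumeration whose nonempty join-strings are normalised and collected into a single set in one pass.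
import Mathlib
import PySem

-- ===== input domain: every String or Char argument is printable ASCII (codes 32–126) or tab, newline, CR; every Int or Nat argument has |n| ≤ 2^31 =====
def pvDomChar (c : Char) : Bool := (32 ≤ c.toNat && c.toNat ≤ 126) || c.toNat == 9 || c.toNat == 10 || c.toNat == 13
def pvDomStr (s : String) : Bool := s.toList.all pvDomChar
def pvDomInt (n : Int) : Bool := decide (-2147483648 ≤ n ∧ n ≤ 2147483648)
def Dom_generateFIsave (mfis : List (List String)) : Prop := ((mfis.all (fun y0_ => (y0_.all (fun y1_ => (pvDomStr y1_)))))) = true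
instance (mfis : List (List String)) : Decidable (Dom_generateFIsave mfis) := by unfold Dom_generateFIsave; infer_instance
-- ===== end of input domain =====

-- B replaces the size-by-size itertools.combinations powerset with one recursive
-- include/exclude subset enumeration fused with the normalisation pass (objective: simpler).

-- ===== PORT A =====
-- ",".join(sorted(element))  — appears in both Python sources
def pvJoinSorted (e : List String) : String :=
  PySem.Str.join "," (PySem.List.sorted e (fun x => x) false)

-- ",".join(sorted(item.split(",")))  — appears in both Python sources ("," ≠ "", so split? is some)
def pvNorm (item : String) : String :=
  PySem.Str.join "," (PySem.List.sorted ((PySem.Str.split? item ",").getD []) (fun x => x) false)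

-- hand port of itertools.combinations(l, i) (not in PySem): the i-element subsequences, in index order
def pvCombinations : List String → Nat → List (List String)
  | _, 0 => [[]]
  | [], _+1 => []
  | x :: xs, i+1 => (pvCombinations xs i).map (fun e => x :: e) ++ pvCombinations xs (i+1)

def pvPowerset (l : List String) : PySem.Set String :=
  (PySem.List.pyRange 0 ((l.length : Int) + 1) 1).foldl
    (fun ret i =>
      let comb := (pvCombinations l i.toNat).foldl
        (fun comb element =>
          let temp := pvJoinSorted element
          if temp ≠ "" then PySem.Set.add comb temp else comb)
        PySem.Set.empty
      PySem.Set.union ret comb)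
    PySem.Set.empty

def generateFIsave (mfis : List (List String)) : List String :=
  let fi := mfis.foldl (fun fi mfi => PySem.Set.union fi (pvPowerset mfi)) PySem.Set.empty
  let res := fi.foldl (fun res item => PySem.Set.add res (pvNorm item)) PySem.Set.empty
  PySem.List.sorted res (fun x => x) false

-- ===== PORT B =====
def pvSubsets : List String → List (List String)
  | [] => [[]]
  | x :: xs =>
    let rest := pvSubsets xs
    rest ++ rest.map (fun s => x :: s)

def generateFIsave_alt (mfis : List (List String)) : List String :=
  let acc := mfis.foldl
    (fun acc mfi =>
      (pvSubsets mfi).foldl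
        (fun acc s =>
          let t := pvJoinSorted s
          if t ≠ "" then PySem.Set.add acc (pvNorm t) else acc)
        acc)
    PySem.Set.empty
  PySem.List.sorted acc (fun x => x) false

-- ===== PRECONDITION & SPEC =====
def Spec_generateFIsave (mfis : List (List String)) (out : List String) : Prop := out = generateFIsave_alt mfis
instance (mfis : List (List String)) (out : List String) : Decidable (Spec_generateFIsave mfis out) := by unfold Spec_generateFIsave; infer_instance

-- ===== CLAIM (what is proved, stated in full; the proofs are below) =====
def Claim_equal_generateFIsave : Prop := ∀ (mfis : List (List String)), Dom_generateFIsave mfis → Spec_generateFIsave mfis (generateFIsave mfis)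

-- ===== LEMMAS AND PROOFS =====

theorem pv_mem_combinations (e l : List String) (i : Nat) :
    e ∈ pvCombinations l i ↔ e.Sublist l ∧ e.length = i := by
  induction l generalizing e i with
  | nil =>
    cases i with
    | zero => simp [pvCombinations, List.length_eq_zero_iff, List.sublist_nil]
    | succ n =>
      simp only [pvCombinations, List.not_mem_nil, false_iff, List.sublist_nil, not_and]
      rintro rfl; simp
  | cons x xs ih =>
    cases i with
    | zero =>
      simp only [pvCombinations, List.mem_singleton, List.length_eq_zero_iff]
      constructor
      · rintro rfl; simp
      · rintro ⟨_, rfl⟩; rfl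
    | succ i =>
      simp only [pvCombinations, List.mem_append, List.mem_map, ih, List.sublist_cons_iff]
      constructor
      · rintro (⟨e', ⟨hs, hl⟩, rfl⟩ | ⟨hs, hl⟩)
        · exact ⟨Or.inr ⟨e', rfl, hs⟩, by simp [hl]⟩
        · exact ⟨Or.inl hs, hl⟩
      · rintro ⟨hs | ⟨r, rfl, hr⟩, hl⟩
        · exact Or.inr ⟨hs, hl⟩
        · exact Or.inl ⟨r, ⟨hr, by simpa using hl⟩, rfl⟩

theorem pv_mem_subsets (s l : List String) : s ∈ pvSubsets l ↔ s.Sublist l := by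
  induction l generalizing s with
  | nil => simp [pvSubsets]
  | cons x xs ih =>
    simp only [pvSubsets, List.mem_append, List.mem_map, ih, List.sublist_cons_iff]
    constructor
    · rintro (h | ⟨r, hr, rfl⟩)
      · exact Or.inl h
      · exact Or.inr ⟨r, rfl, hr⟩
    · rintro (h | ⟨r, rfl, hr⟩)
      · exact Or.inl h
      · exact Or.inr ⟨r, hr, rfl⟩

theorem pv_mem_comb_loop (es : List (List String)) (c₀ : PySem.Set String) (y : String) :
    y ∈ es.foldl (fun comb element =>
        let temp := pvJoinSorted element
        if temp ≠ "" then PySem.Set.add comb temp else comb) c₀ ↔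
      y ∈ c₀ ∨ ∃ e ∈ es, pvJoinSorted e ≠ "" ∧ y = pvJoinSorted e := by
  induction es generalizing c₀ with
  | nil => simp
  | cons e es ih =>
    simp only [List.foldl_cons]
    rw [ih]
    by_cases h : pvJoinSorted e = ""
    · simp [h]
    · simp only [h, if_pos, ne_eq, not_false_iff, PySem.Set.mem_add,
        List.mem_cons]
      constructor
      · rintro ((hy | rfl) | ⟨b, hb, hne, rfl⟩)
        · exact Or.inl hy
        · exact Or.inr ⟨e, Or.inl rfl, h, rfl⟩
        · exact Or.inr ⟨b, Or.inr hb, hne, rfl⟩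
      · rintro (hy | ⟨b, (rfl | hb), hne, rfl⟩)
        · exact Or.inl (Or.inl hy)
        · exact Or.inl (Or.inr rfl)
        · exact Or.inr ⟨b, hb, hne, rfl⟩


theorem pv_mem_ps_loop (l : List String) (is : List Int) (r₀ : PySem.Set String) (y : String) :
    y ∈ is.foldl
      (fun ret i =>
        let comb := (pvCombinations l i.toNat).foldl
          (fun comb element =>
            let temp := pvJoinSorted element
            if temp ≠ "" then PySem.Set.add comb temp else comb)
          PySem.Set.empty
        PySem.Set.union ret comb)
      r₀ ↔
      y ∈ r₀ ∨ ∃ i ∈ is, ∃ e ∈ pvCombinations l i.toNat, pvJoinSorted e ≠ "" ∧ y = pvJoinSorted e := by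
  induction is generalizing r₀ with
  | nil => simp
  | cons i is ih =>
    simp only [List.foldl_cons]
    rw [ih]
    simp only [PySem.Set.mem_union, pv_mem_comb_loop, List.mem_cons, PySem.Set.empty,
      List.not_mem_nil, false_or]
    constructor
    · rintro ((hy | ⟨e, he, hne, rfl⟩) | ⟨j, hj, he⟩)
      · exact Or.inl hy
      · exact Or.inr ⟨i, Or.inl rfl, e, he, hne, rfl⟩
      · exact Or.inr ⟨j, Or.inr hj, he⟩
    · rintro (hy | ⟨j, (rfl | hj), he⟩)
      · exact Or.inl (Or.inl hy)
      · rcases he with ⟨e, he, hne, rfl⟩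
        exact Or.inl (Or.inr ⟨e, he, hne, rfl⟩)
      · exact Or.inr ⟨j, hj, he⟩


theorem pv_mem_powerset (l : List String) (y : String) :
    y ∈ pvPowerset l ↔ ∃ e, e.Sublist l ∧ pvJoinSorted e ≠ "" ∧ y = pvJoinSorted e := by
  unfold pvPowerset
  rw [pv_mem_ps_loop]
  have hempty : ¬ y ∈ (PySem.Set.empty : PySem.Set String) := by simp [PySem.Set.empty]
  constructor
  · rintro (h0 | ⟨i, hi, e, he, hne, rfl⟩)
    · exact absurd h0 hempty
    · rcases (pv_mem_combinations e l i.toNat).mp he with ⟨hs, _⟩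
      exact ⟨e, hs, hne, rfl⟩
  · rintro ⟨e, hs, hne, rfl⟩
    refine Or.inr ⟨(e.length : Int), ?_, e, ?_, hne, rfl⟩
    · rw [PySem.List.mem_pyRange_one]
      have := hs.length_le
      omega
    · rw [pv_mem_combinations]
      exact ⟨hs, by simp⟩


theorem pv_mem_fi (mfis : List (List String)) (f₀ : PySem.Set String) (y : String) :
    y ∈ mfis.foldl (fun fi mfi => PySem.Set.union fi (pvPowerset mfi)) f₀ ↔
      y ∈ f₀ ∨ ∃ mfi ∈ mfis, y ∈ pvPowerset mfi := by
  induction mfis generalizing f₀ with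
  | nil => simp
  | cons m ms ih =>
    simp only [List.foldl_cons]
    rw [ih]
    simp only [PySem.Set.mem_union, List.mem_cons]
    constructor
    · rintro ((hy | hm) | ⟨m', hm', hy⟩)
      · exact Or.inl hy
      · exact Or.inr ⟨m, Or.inl rfl, hm⟩
      · exact Or.inr ⟨m', Or.inr hm', hy⟩
    · rintro (hy | ⟨m', (rfl | hm'), hy⟩)
      · exact Or.inl (Or.inl hy)
      · exact Or.inl (Or.inr hy)
      · exact Or.inr ⟨m', hm', hy⟩


theorem pv_nodup_res (items : List String) (r₀ : PySem.Set String) (h : r₀.Nodup) :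
    (items.foldl (fun res item => PySem.Set.add res (pvNorm item)) r₀).Nodup := by
  induction items generalizing r₀ with
  | nil => exact h
  | cons i is ih => exact ih _ (PySem.Set.nodup_add _ _ h)

theorem pv_mem_sub_loop (ss : List (List String)) (a₀ : PySem.Set String) (y : String) :
    y ∈ ss.foldl
      (fun acc s =>
        let t := pvJoinSorted s
        if t ≠ "" then PySem.Set.add acc (pvNorm t) else acc)
      a₀ ↔
      y ∈ a₀ ∨ ∃ s ∈ ss, pvJoinSorted s ≠ "" ∧ y = pvNorm (pvJoinSorted s) := by
  induction ss generalizing a₀ with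
  | nil => simp
  | cons s ss ih =>
    simp only [List.foldl_cons]
    rw [ih]
    by_cases h : pvJoinSorted s = ""
    · simp [h]
    · simp only [h, ne_eq, not_false_iff, if_true, PySem.Set.mem_add, List.mem_cons]
      constructor
      · rintro ((hy | rfl) | ⟨b, hb, hne, rfl⟩)
        · exact Or.inl hy
        · exact Or.inr ⟨s, Or.inl rfl, h, rfl⟩
        · exact Or.inr ⟨b, Or.inr hb, hne, rfl⟩
      · rintro (hy | ⟨b, (rfl | hb), hne, rfl⟩)
        · exact Or.inl (Or.inl hy)
        · exact Or.inl (Or.inr rfl)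
        · exact Or.inr ⟨b, hb, hne, rfl⟩

theorem pv_nodup_sub_loop (ss : List (List String)) (a₀ : PySem.Set String) (h : a₀.Nodup) :
    (ss.foldl
      (fun acc s =>
        let t := pvJoinSorted s
        if t ≠ "" then PySem.Set.add acc (pvNorm t) else acc)
      a₀).Nodup := by
  induction ss generalizing a₀ with
  | nil => exact h
  | cons s ss ih =>
    simp only [List.foldl_cons]
    apply ih
    split_ifs with hne
    · exact PySem.Set.nodup_add _ _ h
    · exact h

theorem pv_mem_acc (mfis : List (List String)) (a₀ : PySem.Set String) (y : String) :
    y ∈ mfis.foldl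
      (fun acc mfi =>
        (pvSubsets mfi).foldl
          (fun acc s =>
            let t := pvJoinSorted s
            if t ≠ "" then PySem.Set.add acc (pvNorm t) else acc)
          acc)
      a₀ ↔
      y ∈ a₀ ∨ ∃ mfi ∈ mfis, ∃ s, s.Sublist mfi ∧ pvJoinSorted s ≠ "" ∧ y = pvNorm (pvJoinSorted s) := by
  induction mfis generalizing a₀ with
  | nil => simp
  | cons m ms ih =>
    simp only [List.foldl_cons]
    rw [ih, pv_mem_sub_loop]
    simp only [List.mem_cons, pv_mem_subsets]
    constructor
    · rintro ((hy | ⟨s, hs, hne, rfl⟩) | ⟨m', hm', hrest⟩)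
      · exact Or.inl hy
      · exact Or.inr ⟨m, Or.inl rfl, s, hs, hne, rfl⟩
      · exact Or.inr ⟨m', Or.inr hm', hrest⟩
    · rintro (hy | ⟨m', (rfl | hm'), hrest⟩)
      · exact Or.inl (Or.inl hy)
      · rcases hrest with ⟨s, hs, hne, rfl⟩
        exact Or.inl (Or.inr ⟨s, hs, hne, rfl⟩)
      · exact Or.inr ⟨m', hm', hrest⟩

theorem pv_nodup_acc (mfis : List (List String)) (a₀ : PySem.Set String) (h : a₀.Nodup) :
    (mfis.foldl
      (fun acc mfi =>
        (pvSubsets mfi).foldl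
          (fun acc s =>
            let t := pvJoinSorted s
            if t ≠ "" then PySem.Set.add acc (pvNorm t) else acc)
          acc)
      a₀).Nodup := by
  induction mfis generalizing a₀ with
  | nil => exact h
  | cons m ms ih => exact ih _ (pv_nodup_sub_loop _ _ h)

-- ===== VERDICT (by name: the statement is the Claim_ definition above) =====
theorem generateFIsave_spec : Claim_equal_generateFIsave := by
  intro mfis _
  unfold Spec_generateFIsave generateFIsave generateFIsave_alt
  apply PySem.List.sorted_eq_sorted_of_perm _ _ _ (fun a b h => h)
  have hempty : ∀ y : String, ¬ y ∈ (PySem.Set.empty : PySem.Set String) := by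
    simp [PySem.Set.empty]
  rw [List.perm_ext_iff_of_nodup
    (pv_nodup_res _ _ (by simp [PySem.Set.empty]))
    (pv_nodup_acc _ _ (by simp [PySem.Set.empty]))]
  intro y
  rw [PySem.Set.mem_foldl_add, pv_mem_acc]
  simp only [pv_mem_fi, pv_mem_powerset, hempty, false_or]
  constructor
  · rintro ⟨item, ⟨mfi, hmfi, e, hs, hne, rfl⟩, rfl⟩
    exact ⟨mfi, hmfi, e, hs, hne, rfl⟩
  · rintro ⟨mfi, hmfi, s, hs, hne, rfl⟩
    exact ⟨pvJoinSorted s, ⟨mfi, hmfi, s, hs, hne, rfl⟩, rfl⟩
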